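-- pv_equiv track=rewrite | github.com/qianlongzju/Leet_Code | Algorithms/py/招商银行01.py | deleteText
-- ===== SOURCE A (Python) =====
-- def deleteText(article, index):
--     """
--     :type article: str
--     :type index: int
--     :rtype: str
--     """
--     if article[index] == ' ':
--         return article
--     i, j = index, index
--     while i >= 1 and article[i-1] != ' ':
--         i -= 1
--     while j <= len(article)-2 and article[j+1] != ' ':
--         j += 1
--     article = article[:i] + article[j+1:]
--     return " ".join(word for word in article.split(" ") if word != '')
-- ===== SOURCE B (Python) =====
-- def deleteText(article, index):
--     if article[index] == ' ':
--         return article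
--     res = []
--     pos = 0
--     for word in article.split(' '):
--         if word != '' and not (pos <= index < pos + len(word)):
--             res.append(word)
--         pos += len(word) + 1
--     return ' '.join(res)
-- ===== Notes on version B (the rewrite author's own statement) =====
-- stated objective: faster
-- what changed: B replaces A's outward two-pointer per-character scan plus slice-and-re-split by tokenizing once with split(' ') and walking the tokens with a running character offset, skipping the single word whose span contains the index; Pre_ restricts to the natural domain 0 <= index < len(article), excluding in-range negative indices, on which A's returned value is an artefact of mixing the raw negative index into its slice arithmetic.
-- outside the precondition, e.g. on deleteText('ab cd', -1): A returns 'ab c cd', B returns 'ab cd'; on deleteText('ab', -1): A returns 'a', B returns 'ab'; on deleteText('ab', 5): A raises IndexError, B raises IndexError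
import Mathlib
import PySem

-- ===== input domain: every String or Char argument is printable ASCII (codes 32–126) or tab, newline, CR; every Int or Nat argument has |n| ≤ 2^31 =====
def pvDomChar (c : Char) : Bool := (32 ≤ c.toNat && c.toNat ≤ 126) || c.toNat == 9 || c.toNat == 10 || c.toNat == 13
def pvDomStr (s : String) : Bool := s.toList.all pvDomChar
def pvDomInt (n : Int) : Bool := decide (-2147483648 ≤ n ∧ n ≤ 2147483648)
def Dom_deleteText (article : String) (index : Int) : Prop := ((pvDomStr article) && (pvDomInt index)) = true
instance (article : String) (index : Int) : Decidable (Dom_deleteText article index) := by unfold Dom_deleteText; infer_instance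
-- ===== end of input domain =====

-- B replaces A's outward two-pointer character scan + slice + re-split by a single
-- split(' ') walked with a running character offset (objective: alternative).

-- ===== PORT A =====
-- 'while i >= 1 and article[i-1] != " ": i -= 1'  (fuel makes the loop structural; index.toNat steps always suffice)
def pvLoopI (s : List Char) : Nat → Int → Int
  | 0, i => i
  | fuel + 1, i =>
    if 1 ≤ i ∧ PySem.List.pyGetD s (i - 1) ' ' ≠ ' ' then pvLoopI s fuel (i - 1) else i

-- 'while j <= len(article)-2 and article[j+1] != " ": j += 1'  (2*len(article) steps always suffice)
def pvLoopJ (s : List Char) : Nat → Int → Int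
  | 0, j => j
  | fuel + 1, j =>
    if j ≤ (s.length : Int) - 2 ∧ PySem.List.pyGetD s (j + 1) ' ' ≠ ' ' then pvLoopJ s fuel (j + 1) else j

def deleteText (article : String) (index : Int) : String :=
  let s := article.toList
  if PySem.List.pyGet? s index = some ' ' then article
  else
    let i := pvLoopI s index.toNat index
    let j := pvLoopJ s (2 * s.length) index
    let t := PySem.List.slice s none (some i) ++ PySem.List.slice s (some (j + 1)) none
    String.mk (PySem.Chars.join [' '] ((PySem.Chars.splitOn t [' ']).filter (fun w => w != [])))

-- ===== PORT B =====
def deleteText_alt (article : String) (index : Int) : String :=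
  let s := article.toList
  if PySem.List.pyGet? s index = some ' ' then article
  else
    let res := ((PySem.Chars.splitOn s [' ']).foldl
      (fun (st : List (List Char) × Int) w =>
        (if w ≠ [] ∧ ¬(st.2 ≤ index ∧ index < st.2 + (w.length : Int)) then st.1 ++ [w] else st.1,
         st.2 + (w.length : Int) + 1)) ([], 0)).1
    String.mk (PySem.Chars.join [' '] res)

-- ===== PRECONDITION & SPEC =====
-- Pre_ restricts to the task's natural domain 0 <= index < len(article): for index >= len
-- or index < -len Python A raises IndexError at 'article[index]', and for an in-range
-- negative index (outside the natural domain of this word-position task) A's value is an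
-- artefact of mixing the raw negative index into its slice arithmetic.
def Pre_deleteText (article : String) (index : Int) : Prop :=
  0 ≤ index ∧ index < (article.toList.length : Int)
instance (article : String) (index : Int) : Decidable (Pre_deleteText article index) := by
  unfold Pre_deleteText; infer_instance
def pvWitness_deleteText : String × Int := ("ab cd", 3)

def Spec_deleteText (article : String) (index : Int) (out : String) : Prop :=
  out = deleteText_alt article index
instance (article : String) (index : Int) (out : String) : Decidable (Spec_deleteText article index out) := by
  unfold Spec_deleteText; infer_instance

-- ===== CLAIM (what is proved, stated in full; the proofs are below) =====
def Claim_equal_deleteText : Prop := ∀ (article : String) (index : Int), Dom_deleteText article index → Pre_deleteText article index → Spec_deleteText article index (deleteText article index)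

-- ===== LEMMAS AND PROOFS =====

/- Bridge: PySem's split on a one-character separator is Mathlib's splitOnP. -/
theorem pv_modifyHead_id {α : Type} (l : List (List α)) :
    List.modifyHead (fun x => x) l = l := by
  cases l <;> simp

theorem pv_go_spec (c : Char) :
    ∀ (fuel : Nat) (l cur : List Char) (acc : List (List Char)), l.length ≤ fuel →
      PySem.Chars.splitOn.go [c] fuel l cur acc
        = acc.reverse ++ (List.splitOnP (· == c) l).modifyHead (cur.reverse ++ ·) := by
  intro fuel
  induction fuel with
  | zero =>
    intro l cur acc hl
    have : l = [] := by cases l <;> simp_all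
    subst this
    simp [PySem.Chars.splitOn.go, List.splitOnP_nil]
  | succ f ih =>
    intro l cur acc hl
    cases l with
    | nil => simp [PySem.Chars.splitOn.go, List.splitOnP_nil]
    | cons ch rest =>
      by_cases hc : ch = c
      · subst hc
        have hpre : List.isPrefixOf [ch] (ch :: rest) = true := by simp [List.isPrefixOf]
        rw [PySem.Chars.splitOn.go, if_pos hpre]
        simp only [List.length_cons] at hl
        rw [ih _ _ _ (by simpa using Nat.le_of_succ_le_succ hl)]
        rw [List.splitOnP_cons]
        simp
        exact pv_modifyHead_id _
      · have hpre : List.isPrefixOf [c] (ch :: rest) = false := by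
          simp [List.isPrefixOf]; exact fun h => (hc h.symm).elim
        rw [PySem.Chars.splitOn.go, if_neg (by simp [hpre])]
        simp only [List.length_cons] at hl
        rw [ih _ _ _ (Nat.le_of_succ_le_succ hl)]
        rw [List.splitOnP_cons, if_neg (by simp [hc])]
        cases h : List.splitOnP (· == c) rest with
        | nil => exact absurd h (List.splitOnP_ne_nil _ _)
        | cons a t => simp

theorem pv_splitOn_single (s : List Char) (c : Char) :
    PySem.Chars.splitOn s [c] = List.splitOnP (· == c) s := by
  unfold PySem.Chars.splitOn
  rw [pv_go_spec c (s.length + 1) s [] [] (Nat.le_succ _)]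
  simp
  exact pv_modifyHead_id _

/- splitOnP over the chunk decomposition. -/
theorem pv_splitOnP_no_sep (s : List Char) (h : ∀ x ∈ s, x ≠ ' ') :
    List.splitOnP (· == ' ') s = [s] := by
  induction s with
  | nil => simp [List.splitOnP_nil]
  | cons a t ih =>
    rw [List.splitOnP_cons, if_neg (by simp; exact h a (by simp))]
    rw [ih (fun x hx => h x (by simp [hx]))]
    simp

theorem pv_splitOnP_word_append (cw r : List Char) (h : ∀ x ∈ cw, x ≠ ' ') :
    List.splitOnP (· == ' ') (cw ++ ' ' :: r) = cw :: List.splitOnP (· == ' ') r := by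
  induction cw with
  | nil => simp [List.splitOnP_cons]
  | cons a t ih =>
    rw [List.cons_append, List.splitOnP_cons, if_neg (by simp; exact h a (by simp))]
    rw [ih (fun x hx => h x (by simp [hx]))]
    simp

/- Characterizations of A's two while-loops. -/
theorem pv_loopI_nonneg (s : List Char) :
    ∀ (fuel : Nat) (i : Int), 0 ≤ i → 0 ≤ pvLoopI s fuel i := by
  intro fuel
  induction fuel with
  | zero => intro i hi; simpa [pvLoopI] using hi
  | succ f ih =>
    intro i hi
    rw [pvLoopI]
    split
    · exact ih _ (by omega)
    · exact hi

theorem pv_loopJ_ge (s : List Char) :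
    ∀ (fuel : Nat) (j : Int), j ≤ pvLoopJ s fuel j := by
  intro fuel
  induction fuel with
  | zero => intro j; simp [pvLoopJ]
  | succ f ih =>
    intro j
    rw [pvLoopJ]
    split
    · exact le_trans (by omega) (ih (j + 1))
    · exact le_refl j

theorem pv_getElem_mid (cw r : List Char) (m : Nat) (hm : m < r.length)
    (h : cw.length + 1 + m < (cw ++ ' ' :: r).length) :
    (cw ++ ' ' :: r)[cw.length + 1 + m]'h = r[m]'hm := by
  rw [List.getElem_append_right (by omega)]
  rw [getElem_congr rfl (show cw.length + 1 + m - cw.length = m + 1 by omega) (by simp; omega)]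
  simp

theorem pv_getElem_sp (cw r : List Char) (h : cw.length < (cw ++ ' ' :: r).length) :
    (cw ++ ' ' :: r)[cw.length]'h = ' ' := by
  rw [List.getElem_append_right (by omega)]
  rw [getElem_congr rfl (show cw.length - cw.length = 0 by omega) (by simp)]
  simp

theorem pv_pyGetD_mid (cw r : List Char) (m : Nat) (hm : m < r.length) :
    PySem.List.pyGetD (cw ++ ' ' :: r) ((cw.length + 1 + m : Nat) : Int) ' ' = r[m]'hm := by
  rw [PySem.List.pyGetD_eq_getElem _ _ (by positivity) (by simp; push_cast; omega)]
  rw [getElem_congr rfl (show ((cw.length + 1 + m : Nat) : Int).toNat = cw.length + 1 + m by omega) (by simp; omega)]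
  exact pv_getElem_mid cw r m hm _

theorem pv_pyGetD_sp (cw r : List Char) :
    PySem.List.pyGetD (cw ++ ' ' :: r) ((cw.length : Nat) : Int) ' ' = ' ' := by
  rw [PySem.List.pyGetD_eq_getElem _ _ (by positivity) (by simp; try omega)]
  rw [getElem_congr rfl (show ((cw.length : Nat) : Int).toNat = cw.length by omega) (by simp)]
  exact pv_getElem_sp cw r _

theorem pv_pyGetD_nat (s : List Char) (m : Nat) (hm : m < s.length) :
    PySem.List.pyGetD s ((m : Nat) : Int) ' ' = s[m]'hm := by
  rw [PySem.List.pyGetD_eq_getElem _ _ (by positivity) (by push_cast; omega)]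
  rw [getElem_congr rfl (show ((m : Nat) : Int).toNat = m by omega) (by omega)]

theorem pv_loopI_to_zero (cw r : List Char) (hc : ∀ x ∈ cw, x ≠ ' ') :
    ∀ (fuel k : Nat), k ≤ fuel → k ≤ cw.length → pvLoopI (cw ++ r) fuel (k : Int) = 0 := by
  intro fuel
  induction fuel with
  | zero => intro k hk _; interval_cases k; simp [pvLoopI]
  | succ f ih =>
    intro k hk hkc
    cases k with
    | zero => rw [pvLoopI]; rw [if_neg (by push_neg; intro h; omega)]; simp
    | succ m =>
      have hm : m < cw.length := by omega
      have hmr : m < (cw ++ r).length := by simp; omega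
      have hget : PySem.List.pyGetD (cw ++ r) (((m + 1 : Nat) : Int) - 1) ' ' = cw[m]'hm := by
        rw [show ((m + 1 : Nat) : Int) - 1 = ((m : Nat) : Int) by push_cast; ring]
        rw [pv_pyGetD_nat _ m hmr]
        exact List.getElem_append_left hm
      rw [pvLoopI, if_pos ⟨by push_cast; omega, by rw [hget]; exact hc _ (List.getElem_mem hm)⟩]
      rw [show ((m + 1 : Nat) : Int) - 1 = ((m : Nat) : Int) by push_cast; ring]
      exact ih m (by omega) (by omega)

theorem pv_loopJ_to_last (cw r : List Char) (hc : ∀ x ∈ cw, x ≠ ' ')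
    (hr : r = [] ∨ ∃ r', r = ' ' :: r') :
    ∀ (fuel k : Nat), cw.length - 1 - k ≤ fuel → k < cw.length →
      pvLoopJ (cw ++ r) fuel (k : Int) = (cw.length : Int) - 1 := by
  intro fuel
  induction fuel with
  | zero =>
    intro k hf hk
    have : k = cw.length - 1 := by omega
    subst this
    simp [pvLoopJ]
    omega
  | succ f ih =>
    intro k hf hk
    by_cases hlast : k + 1 = cw.length
    · rcases hr with rfl | ⟨r', rfl⟩
      · rw [pvLoopJ, if_neg (by push_neg; intro h; simp at h; omega)]
        omega
      · rw [pvLoopJ, if_neg ?_]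
        · omega
        · push_neg
          intro _
          rw [show (k : Int) + 1 = ((cw.length : Nat) : Int) by omega]
          rw [pv_pyGetD_sp]
    · have hk1 : k + 1 < cw.length := by omega
      have hk1r : k + 1 < (cw ++ r).length := by simp; omega
      have hget : PySem.List.pyGetD (cw ++ r) ((k : Int) + 1) ' ' = cw[k + 1]'hk1 := by
        rw [show (k : Int) + 1 = ((k + 1 : Nat) : Int) by push_cast; ring]
        rw [pv_pyGetD_nat _ (k + 1) hk1r]
        exact List.getElem_append_left hk1
      rw [pvLoopJ, if_pos ⟨by simp; push_cast; omega, by rw [hget]; exact hc _ (List.getElem_mem hk1)⟩]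
      rw [show (k : Int) + 1 = ((k + 1 : Nat) : Int) by push_cast; ring]
      exact ih (k + 1) (by omega) hk1

theorem pv_loopI_shift (cw r : List Char) :
    ∀ (fuel : Nat) (k : Nat), k ≤ r.length →
      pvLoopI (cw ++ ' ' :: r) fuel ((cw.length : Int) + 1 + (k : Int))
        = (cw.length : Int) + 1 + pvLoopI r fuel (k : Int) := by
  intro fuel
  induction fuel with
  | zero => intro k _; simp [pvLoopI]
  | succ f ih =>
    intro k hk
    cases k with
    | zero =>
      rw [pvLoopI, if_neg ?_, pvLoopI, if_neg (by push_neg; intro h; omega)]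
      · push_neg
        intro _
        rw [show (cw.length : Int) + 1 + ((0 : Nat) : Int) - 1 = ((cw.length : Nat) : Int) by push_cast; ring]
        rw [pv_pyGetD_sp]
    | succ m =>
      have hm : m < r.length := by omega
      have g1 : PySem.List.pyGetD (cw ++ ' ' :: r) ((cw.length : Int) + 1 + ((m + 1 : Nat) : Int) - 1) ' ' = r[m]'hm := by
        rw [show (cw.length : Int) + 1 + ((m + 1 : Nat) : Int) - 1 = ((cw.length + 1 + m : Nat) : Int) by push_cast; ring]
        exact pv_pyGetD_mid cw r m hm
      have g2 : PySem.List.pyGetD r (((m + 1 : Nat) : Int) - 1) ' ' = r[m]'hm := by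
        rw [show ((m + 1 : Nat) : Int) - 1 = ((m : Nat) : Int) by push_cast; ring]
        exact pv_pyGetD_nat r m hm
      by_cases hsp : r[m]'hm = ' '
      · rw [pvLoopI, if_neg (by push_neg; intro _; rw [g1]; simp [hsp])]
        rw [pvLoopI, if_neg (by push_neg; intro _; rw [g2]; simp [hsp])]
      · rw [pvLoopI, if_pos ⟨by push_cast; omega, by rw [g1]; exact hsp⟩]
        rw [pvLoopI, if_pos ⟨by push_cast; omega, by rw [g2]; exact hsp⟩]
        rw [show (cw.length : Int) + 1 + ((m + 1 : Nat) : Int) - 1 = (cw.length : Int) + 1 + ((m : Nat) : Int) by push_cast; ring]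
        rw [show ((m + 1 : Nat) : Int) - 1 = ((m : Nat) : Int) by push_cast; ring]
        exact ih m (by omega)

theorem pv_loopJ_shift (cw r : List Char) :
    ∀ (fuel : Nat) (k : Nat), k < r.length →
      pvLoopJ (cw ++ ' ' :: r) fuel ((cw.length : Int) + 1 + (k : Int))
        = (cw.length : Int) + 1 + pvLoopJ r fuel (k : Int) := by
  intro fuel
  induction fuel with
  | zero => intro k _; simp [pvLoopJ]
  | succ f ih =>
    intro k hk
    have hlen : ((cw ++ ' ' :: r).length : Int) = (cw.length : Int) + 1 + (r.length : Int) := by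
      simp
      push_cast
      ring
    by_cases hend : k + 1 < r.length
    · have g1 : PySem.List.pyGetD (cw ++ ' ' :: r) ((cw.length : Int) + 1 + (k : Int) + 1) ' ' = r[k + 1]'hend := by
        rw [show (cw.length : Int) + 1 + (k : Int) + 1 = ((cw.length + 1 + (k + 1) : Nat) : Int) by push_cast; ring]
        exact pv_pyGetD_mid cw r (k + 1) hend
      have g2 : PySem.List.pyGetD r ((k : Int) + 1) ' ' = r[k + 1]'hend := by
        rw [show (k : Int) + 1 = ((k + 1 : Nat) : Int) by push_cast; ring]
        exact pv_pyGetD_nat r (k + 1) hend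
      by_cases hsp : r[k + 1]'hend = ' '
      · rw [pvLoopJ, if_neg (by push_neg; intro _; rw [g1]; simp [hsp])]
        rw [pvLoopJ, if_neg (by push_neg; intro _; rw [g2]; simp [hsp])]
      · rw [pvLoopJ, if_pos ⟨by rw [hlen]; push_cast; omega, by rw [g1]; exact hsp⟩]
        rw [pvLoopJ, if_pos ⟨by push_cast; omega, by rw [g2]; exact hsp⟩]
        rw [show (cw.length : Int) + 1 + (k : Int) + 1 = (cw.length : Int) + 1 + ((k + 1 : Nat) : Int) by push_cast; ring]
        rw [show (k : Int) + 1 = ((k + 1 : Nat) : Int) by push_cast; ring]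
        exact ih (k + 1) (by omega)
    · have hke : k + 1 = r.length := by omega
      rw [pvLoopJ, if_neg (by push_neg; intro h; rw [hlen] at h; omega)]
      rw [pvLoopJ, if_neg (by push_neg; intro h; push_cast at h; omega)]

/- B's loop, as a simple recursion. -/
def pvCollect (k : Int) : List (List Char) → Int → List (List Char)
  | [], _ => []
  | w :: ws, pos =>
    (if w ≠ [] ∧ ¬(pos ≤ k ∧ k < pos + (w.length : Int)) then [w] else [])
      ++ pvCollect k ws (pos + (w.length : Int) + 1)

theorem pv_foldB (k : Int) :
    ∀ (ws : List (List Char)) (acc : List (List Char)) (pos : Int),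
      (ws.foldl (fun (st : List (List Char) × Int) w =>
        (if w ≠ [] ∧ ¬(st.2 ≤ k ∧ k < st.2 + (w.length : Int)) then st.1 ++ [w] else st.1,
         st.2 + (w.length : Int) + 1)) (acc, pos)).1 = acc ++ pvCollect k ws pos := by
  intro ws
  induction ws with
  | nil => intro acc pos; simp [pvCollect]
  | cons w ws ih =>
    intro acc pos
    rw [List.foldl_cons, pvCollect]
    by_cases h : w ≠ [] ∧ ¬(pos ≤ k ∧ k < pos + (w.length : Int))
    · simp only [if_pos h]; rw [ih]; simp
    · simp only [if_neg h]; rw [ih]; simp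

theorem pv_collect_of_lt (k : Int) :
    ∀ (ws : List (List Char)) (pos : Int), k < pos →
      pvCollect k ws pos = ws.filter (fun w => w != []) := by
  intro ws
  induction ws with
  | nil => intro pos _; simp [pvCollect]
  | cons w ws ih =>
    intro pos h
    rw [pvCollect, ih _ (by omega), List.filter_cons]
    by_cases hw : w = []
    · subst hw; simp
    · rw [if_pos ⟨hw, by omega⟩, if_pos (by simpa using hw)]
      simp

theorem pv_collect_shift :
    ∀ (ws : List (List Char)) (b k pos : Int),
      pvCollect (b + k) ws (b + pos) = pvCollect k ws pos := by
  intro ws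
  induction ws with
  | nil => intro b k pos; simp [pvCollect]
  | cons w ws ih =>
    intro b k pos
    rw [pvCollect, pvCollect]
    have hc : ((b + pos ≤ b + k ∧ b + k < b + pos + (w.length : Int))
            ↔ (pos ≤ k ∧ k < pos + (w.length : Int))) := by omega
    have : (b + pos + (w.length : Int) + 1) = b + (pos + (w.length : Int) + 1) := by ring
    rw [this, ih]
    congr 1
    by_cases hw : w = []
    · subst hw; simp
    · by_cases h : pos ≤ k ∧ k < pos + (w.length : Int)
      · rw [if_neg (by tauto), if_neg (by tauto)]
      · rw [if_pos ⟨hw, by tauto⟩, if_pos ⟨hw, h⟩]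

theorem pv_dropWhile_head {p : Char -> Bool} :
    ∀ (l : List Char) (d : Char) (r : List Char), (h : l.dropWhile p = d :: r) → p d = false := by
  intro l
  induction l with
  | nil => intro d r h; simp at h
  | cons a t ih =>
    intro d r h
    rw [List.dropWhile_cons] at h
    by_cases hp : p a
    · rw [if_pos hp] at h; exact ih d r h
    · rw [if_neg hp] at h
      cases h
      simpa using hp

/- The main lemma: for a non-negative in-range index on a non-space character, the
   list of words A joins equals the list of words B collects. -/
theorem pv_main :
    ∀ (n : Nat) (s : List Char) (k fI fJ : Nat),
      s.length ≤ n → k < s.length → s[k]? ≠ some ' ' → k ≤ fI → s.length - 1 - k ≤ fJ →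
      (List.splitOnP (· == ' ')
          (s.take (pvLoopI s fI (k : Int)).toNat ++ s.drop (pvLoopJ s fJ (k : Int) + 1).toNat)).filter
          (fun w => w != [])
        = pvCollect (k : Int) (List.splitOnP (· == ' ') s) 0 := by
  intro n
  induction n with
  | zero => intro s k _ _ _ _ _; omega
  | succ m ih =>
    intro s k fI fJ hn hk hsp hfI hfJ
    have hdec := List.takeWhile_append_dropWhile (p := fun x => x != ' ') (l := s)
    set c := s.takeWhile (fun x => x != ' ') with hc_def
    set rest := s.dropWhile (fun x => x != ' ') with hrest_def
    have hc : ∀ x ∈ c, x ≠ ' ' := by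
      intro x hx
      have := List.mem_takeWhile_imp hx
      simpa using this
    cases hrest : rest with
    | nil =>
      have hs : c = s := by rw [← hdec, hrest]; simp
      have hcs : ∀ x ∈ s, x ≠ ' ' := by rw [← hs]; exact hc
      have hi : pvLoopI s fI (k : Int) = 0 := by
        have := pv_loopI_to_zero s [] hcs fI k hfI (by omega)
        simpa using this
      have hj : pvLoopJ s fJ (k : Int) = (s.length : Int) - 1 := by
        have := pv_loopJ_to_last s [] hcs (Or.inl rfl) fJ k (by omega) hk
        simpa using this
      rw [hi, hj]
      have h1 : ((0 : Int)).toNat = 0 := rfl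
      have h2 : ((s.length : Int) - 1 + 1).toNat = s.length := by omega
      rw [h1, h2]
      simp only [List.take_zero, List.drop_length, List.nil_append]
      rw [List.splitOnP_nil, pv_splitOnP_no_sep s hcs, pvCollect, pvCollect]
      rw [if_neg (by push_neg; intro _; exact ⟨by positivity, by push_cast; omega⟩)]
      simp
    | cons d r' =>
      have hdw : s.dropWhile (fun x => x != ' ') = d :: r' := by
        rw [← hrest_def]; exact hrest
      have hd : d = ' ' := by simpa using pv_dropWhile_head _ _ _ hdw
      subst hd
      have hs : s = c ++ ' ' :: r' := by rw [← hdec, hrest]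
      have hkc : k ≠ c.length := by
        intro he
        apply hsp
        rw [hs, he, List.getElem?_append_right (le_refl _)]
        simp
      have hlen : s.length = c.length + 1 + r'.length := by rw [hs]; simp; omega
      rcases Nat.lt_or_ge k c.length with hklt | hkge
      · -- the deleted word is the first chunk
        have hc0 : 0 < c.length := by omega
        have hi : pvLoopI s fI (k : Int) = 0 := by
          rw [hs]
          exact pv_loopI_to_zero c (' ' :: r') hc fI k hfI (by omega)
        have hj : pvLoopJ s fJ (k : Int) = (c.length : Int) - 1 := by
          rw [hs]
          exact pv_loopJ_to_last c (' ' :: r') hc (Or.inr ⟨r', rfl⟩) fJ k (by omega) hklt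
        rw [hi, hj]
        have h2 : ((c.length : Int) - 1 + 1).toNat = c.length := by omega
        rw [show ((0:Int)).toNat = 0 from rfl, h2]
        simp only [List.take_zero, List.nil_append]
        have hdrop : s.drop c.length = ' ' :: r' := by rw [hs]; exact List.drop_left
        rw [hdrop]
        rw [show (' ' :: r' : List Char) = [] ++ ' ' :: r' by simp]
        rw [pv_splitOnP_word_append [] r' (by simp)]
        rw [hs, pv_splitOnP_word_append c r' hc]
        rw [List.filter_cons, pvCollect]
        rw [if_neg (by simp)]
        rw [if_neg (by push_neg; intro _; exact ⟨by positivity, by push_cast; omega⟩)]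
        rw [pv_collect_of_lt _ _ _ (by push_cast; omega)]
        simp
      · -- the deleted word lies in r'
        have hk' : c.length + 1 ≤ k := by omega
        obtain ⟨k', rfl⟩ : ∃ k', k = c.length + 1 + k' := ⟨k - c.length - 1, by omega⟩
        have hk'r : k' < r'.length := by omega
        have hcast : ((c.length + 1 + k' : Nat) : Int) = (c.length : Int) + 1 + (k' : Int) := by
          push_cast; ring
        have hsp' : r'[k']? ≠ some ' ' := by
          intro hcon
          apply hsp
          rw [hs, List.getElem?_append_right (by omega)]
          rw [show c.length + 1 + k' - c.length = k' + 1 by omega]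
          simpa using hcon
        have hi : pvLoopI s fI ((c.length + 1 + k' : Nat) : Int)
            = (c.length : Int) + 1 + pvLoopI r' fI (k' : Int) := by
          rw [hs, hcast]; exact pv_loopI_shift c r' fI k' (by omega)
        have hj : pvLoopJ s fJ ((c.length + 1 + k' : Nat) : Int)
            = (c.length : Int) + 1 + pvLoopJ r' fJ (k' : Int) := by
          rw [hs, hcast]; exact pv_loopJ_shift c r' fJ k' hk'r
        have hI0 : 0 ≤ pvLoopI r' fI (k' : Int) := pv_loopI_nonneg r' fI _ (by positivity)
        have hJ0 : (k' : Int) ≤ pvLoopJ r' fJ (k' : Int) := pv_loopJ_ge r' fJ _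
        rw [hi, hj]
        have htake : s.take ((c.length : Int) + 1 + pvLoopI r' fI (k' : Int)).toNat
            = (c ++ [' ']) ++ r'.take (pvLoopI r' fI (k' : Int)).toNat := by
          rw [hs, show (c ++ ' ' :: r' : List Char) = (c ++ [' ']) ++ r' by simp]
          rw [List.take_append]
          congr 1
          · rw [List.take_of_length_le (by simp; omega)]
          · congr 1; simp; omega
        have hdrop : s.drop ((c.length : Int) + 1 + pvLoopJ r' fJ (k' : Int) + 1).toNat
            = r'.drop (pvLoopJ r' fJ (k' : Int) + 1).toNat := by
          rw [hs, show (c ++ ' ' :: r' : List Char) = (c ++ [' ']) ++ r' by simp]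
          rw [List.drop_append, List.drop_of_length_le (by simp; omega), List.nil_append]
          congr 1
          simp only [List.length_append, List.length_cons, List.length_nil]
          omega
        rw [htake, hdrop, List.append_assoc, List.append_cons, List.append_assoc]
        simp only [List.nil_append]
        rw [show ((c ++ [' ']) ++ (r'.take (pvLoopI r' fI (k' : Int)).toNat ++ r'.drop (pvLoopJ r' fJ (k' : Int) + 1).toNat) : List Char) = c ++ ' ' :: (r'.take (pvLoopI r' fI (k' : Int)).toNat ++ r'.drop (pvLoopJ r' fJ (k' : Int) + 1).toNat) by simp]
        rw [pv_splitOnP_word_append _ _ hc]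
        rw [hs, pv_splitOnP_word_append c r' hc]
        rw [List.filter_cons, pvCollect]
        have hcnd : ((0 : Int) ≤ ((c.length + 1 + k' : Nat) : Int)
            ∧ ((c.length + 1 + k' : Nat) : Int) < 0 + (c.length : Int)) ↔ False := by
          constructor
          · rintro ⟨_, h2⟩; push_cast at h2; omega
          · exact False.elim
        have hrec : pvCollect ((c.length + 1 + k' : Nat) : Int)
              (List.splitOnP (· == ' ') r') (0 + (c.length : Int) + 1)
            = pvCollect (k' : Int) (List.splitOnP (· == ' ') r') 0 := by
          rw [show ((c.length + 1 + k' : Nat) : Int) = ((c.length : Int) + 1) + (k' : Int) by push_cast; ring]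
          rw [show (0 + (c.length : Int) + 1 : Int) = ((c.length : Int) + 1) + 0 by ring]
          exact pv_collect_shift _ _ _ _
        have hih : (List.splitOnP (· == ' ')
              (r'.take (pvLoopI r' fI (k' : Int)).toNat ++ r'.drop (pvLoopJ r' fJ (k' : Int) + 1).toNat)).filter
              (fun w => w != [])
            = pvCollect (k' : Int) (List.splitOnP (· == ' ') r') 0 := by
          exact ih r' k' fI fJ (by omega) hk'r hsp' (by omega) (by omega)
        rw [hih, hrec]
        by_cases hcnil : c = []
        · rw [if_neg (by simp [hcnil])]
          rw [if_neg (by simp [hcnil])]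
          simp
        · rw [if_pos (by simpa using hcnil)]
          rw [if_pos ⟨hcnil, by rw [not_and]; intro _; push_cast; omega⟩]
          simp

-- ===== VERDICT (by name: the statement is the Claim_ definition above) =====
theorem deleteText_spec : Claim_equal_deleteText := by
  intro article index hDom hPre
  unfold Spec_deleteText
  obtain ⟨hge, hlt⟩ := hPre
  unfold deleteText deleteText_alt
  by_cases hg : PySem.List.pyGet? article.toList index = some ' '
  · simp only [hg, if_true]
  · simp only [if_neg hg]
    set s := article.toList with hs_def
    have hkc : ((index.toNat : Nat) : Int) = index := Int.toNat_of_nonneg hge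
    have hklt : index.toNat < s.length := by omega
    have hsp : s[index.toNat]? ≠ some ' ' := by
      rw [PySem.List.pyGet?_of_nonneg s hge] at hg
      exact hg
    have hi0 : 0 ≤ pvLoopI s index.toNat index := pv_loopI_nonneg s _ _ hge
    have hjge := pv_loopJ_ge s (2 * s.length) index
    have hj0 : 0 ≤ pvLoopJ s (2 * s.length) index + 1 := by omega
    rw [PySem.List.slice_to s hi0, PySem.List.slice_from s hj0]
    rw [pv_splitOn_single, pv_splitOn_single]
    rw [pv_foldB index _ [] 0]
    simp only [List.nil_append]
    have hmain := pv_main s.length s index.toNat index.toNat (2 * s.length)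
      (le_refl _) hklt hsp (le_refl _) (by omega)
    rw [hkc] at hmain
    exact congrArg String.mk (congrArg (PySem.Chars.join [' ']) hmain)
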